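-- pv_equiv track=rewrite | github.com/pexley-math/oeis-A395434 | code/verify_method1.py | _rotations_of
-- ===== SOURCE A (Python) =====
-- def _rot60(cell):
--     """Rotate (q, r) by 60 degrees CCW about the origin: (q, r) -> (-r, q + r)."""
--     q, r = cell
--     return (-r, q + r)
--
-- def _rotations_of(piece):
--     """Return the list of all 6 rotational images of a piece (as frozensets),
--     each normalised by min-shift so the minimum q is 0 (and among q=0 cells,
--     minimum r is 0). This is the canonical form under translation only.
--     """
--     rots = []
--     cur = piece
--     for _ in range(6):
--         cur = frozenset(_rot60(c) for c in cur)
--         mq = min(q for q, _ in cur)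
--         mr = min(r for q, r in cur if q == mq)
--         shift = frozenset((q - mq, r - mr) for q, r in cur)
--         rots.append(shift)
--     return rots
-- ===== SOURCE B (Python) =====
-- # B: fixed closed-form table of the six 60-degree rotations applied directly to
-- # the original piece (no compounded running set); normalization via lexicographic
-- # tuple min, which equals (min q, min r among q == min q).
-- _ROT_TABLE = (
--     lambda q, r: (-r, q + r),        # 1 x 60
--     lambda q, r: (-q - r, q),        # 2 x 60
--     lambda q, r: (-q, -r),           # 3 x 60
--     lambda q, r: (r, -q - r),        # 4 x 60
--     lambda q, r: (q + r, -q),        # 5 x 60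
--     lambda q, r: (q, r),             # 6 x 60 (identity)
-- )
--
-- def _rotations_of(piece):
--     out = []
--     for f in _ROT_TABLE:
--         img = frozenset(f(q, r) for q, r in piece)
--         mq, mr = min(img)
--         out.append(frozenset((q - mq, r - mr) for q, r in img))
--     return out
-- ===== Notes on version B (the rewrite author's own statement) =====
-- stated objective: alternative
-- what changed: B replaces A's six-fold compounding of a running rotated frozenset with a fixed table of six closed-form 60-degree rotation formulas applied directly to the original piece, and normalises by the lexicographic tuple minimum instead of A's separate min-q then min-r-among-min-q passes.
import Mathlib
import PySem

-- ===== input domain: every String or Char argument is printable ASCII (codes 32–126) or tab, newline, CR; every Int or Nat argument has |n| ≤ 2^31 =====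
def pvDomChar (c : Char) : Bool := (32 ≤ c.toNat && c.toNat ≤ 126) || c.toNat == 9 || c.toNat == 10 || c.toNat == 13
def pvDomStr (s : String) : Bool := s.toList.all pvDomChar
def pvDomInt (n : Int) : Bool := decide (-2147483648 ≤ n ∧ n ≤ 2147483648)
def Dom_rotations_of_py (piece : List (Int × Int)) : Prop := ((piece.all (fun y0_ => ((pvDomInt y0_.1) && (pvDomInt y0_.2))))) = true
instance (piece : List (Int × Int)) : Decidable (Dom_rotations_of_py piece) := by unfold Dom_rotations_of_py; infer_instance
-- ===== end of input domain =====

-- B replaces A's compounded running-set rotation with a fixed closed-form table of the six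
-- 60-degree rotations applied directly to the piece, and normalises via the lexicographic
-- tuple minimum (same value as A's min-q / min-r-among-min-q); objective: alternative.


-- ===== PORT A =====
def rot60 (c : Int × Int) : Int × Int := (-c.2, c.1 + c.2)

-- literal port of A: six iterations compounding a running frozenset 'cur';
-- Python's min() over an empty sequence raises ValueError (excluded by Pre_); the
-- '.getD 0' only totalises that unreachable case.
def rotations_of_py (piece : List (Int × Int)) : List (List (Int × Int)) :=
  ((List.range 6).foldl
    (fun (st : List (List (Int × Int)) × List (Int × Int)) _ =>
      let cur : PySem.Set (Int × Int) := PySem.Set.ofList (st.2.map rot60)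
      let mq : Int := (PySem.List.min? (cur.map Prod.fst) (fun v => v)).getD 0
      let mr : Int := (PySem.List.min? ((cur.filter (fun c => c.1 == mq)).map Prod.snd) (fun v => v)).getD 0
      (st.1 ++ [PySem.Set.ofList (cur.map (fun c => (c.1 - mq, c.2 - mr)))], cur))
    ([], piece)).1

-- ===== PORT B =====
-- Python's min() over 2-tuples is the lexicographic minimum; ported by hand (exact on pairs)
-- because Lean's Prod order is not lexicographic.
def pvLexLt (a b : Int × Int) : Bool := a.1 < b.1 || (a.1 == b.1 && a.2 < b.2)

def pvTupleMin : List (Int × Int) → Int × Int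
  | [] => (0, 0)   -- unreachable under Pre_ (Python min raises ValueError on an empty piece)
  | x :: xs => xs.foldl (fun m c => if pvLexLt c m then c else m) x

def pvRotTable : List ((Int × Int) → Int × Int) :=
  [fun c => (-c.2, c.1 + c.2),
   fun c => (-c.1 - c.2, c.1),
   fun c => (-c.1, -c.2),
   fun c => (c.2, -c.1 - c.2),
   fun c => (c.1 + c.2, -c.1),
   fun c => (c.1, c.2)]

def rotations_of_py_alt (piece : List (Int × Int)) : List (List (Int × Int)) :=
  pvRotTable.map (fun f =>
    let img : PySem.Set (Int × Int) := PySem.Set.ofList (piece.map f)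
    let m : Int × Int := pvTupleMin img
    PySem.Set.ofList (img.map (fun c => (c.1 - m.1, c.2 - m.2))))

-- ===== PRECONDITION & SPEC =====
-- Pre_ excludes only the empty piece, on which Python A raises ValueError (min() of an empty sequence).
def Pre_rotations_of_py (piece : List (Int × Int)) : Prop := piece ≠ []
instance (piece : List (Int × Int)) : Decidable (Pre_rotations_of_py piece) := by unfold Pre_rotations_of_py; infer_instance
def pvWitness_rotations_of_py : (List (Int × Int)) := [(0, 0), (1, 0)]

def Spec_rotations_of_py (piece : List (Int × Int)) (out : List (List (Int × Int))) : Prop := out = rotations_of_py_alt piece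
instance (piece : List (Int × Int)) (out : List (List (Int × Int))) : Decidable (Spec_rotations_of_py piece out) := by unfold Spec_rotations_of_py; infer_instance

-- ===== CLAIM (what is proved, stated in full; the proofs are below) =====
def Claim_equal_rotations_of_py : Prop := ∀ (piece : List (Int × Int)), Dom_rotations_of_py piece → Pre_rotations_of_py piece → Spec_rotations_of_py piece (rotations_of_py piece)

-- ===== LEMMAS AND PROOFS =====

-- A's loop step and the two normalisations as proof-side abbreviations (definitionally the ports' bodies)
def stepA (l : List (Int × Int)) : List (Int × Int) := PySem.Set.ofList (l.map rot60)

def normA (l : List (Int × Int)) : List (Int × Int) :=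
  let mq : Int := (PySem.List.min? (l.map Prod.fst) (fun v => v)).getD 0
  let mr : Int := (PySem.List.min? ((l.filter (fun c => c.1 == mq)).map Prod.snd) (fun v => v)).getD 0
  PySem.Set.ofList (l.map (fun c => (c.1 - mq, c.2 - mr)))

def normB (l : List (Int × Int)) : List (Int × Int) :=
  PySem.Set.ofList (l.map (fun c => (c.1 - (pvTupleMin l).1, c.2 - (pvTupleMin l).2)))

lemma A_unfold (piece : List (Int × Int)) :
    rotations_of_py piece =
      [normA (stepA piece), normA (stepA (stepA piece)), normA (stepA (stepA (stepA piece))),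
       normA (stepA (stepA (stepA (stepA piece)))),
       normA (stepA (stepA (stepA (stepA (stepA piece))))),
       normA (stepA (stepA (stepA (stepA (stepA (stepA piece))))))] := by
  show (List.foldl _ ([], piece) [0, 1, 2, 3, 4, 5]).1 = _
  simp only [List.foldl]
  rfl

lemma B_unfold (piece : List (Int × Int)) :
    rotations_of_py_alt piece = pvRotTable.map (fun f => normB (PySem.Set.ofList (piece.map f))) := rfl

lemma rot60_inj : Function.Injective rot60 := by
  intro a b h
  simp only [rot60, Prod.mk.injEq] at h
  exact Prod.ext (by omega) (by omega)

lemma add_map {f : (Int × Int) → (Int × Int)} (hf : Function.Injective f)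
    (s : List (Int × Int)) (x : Int × Int) :
    PySem.Set.add (s.map f) (f x) = (PySem.Set.add s x).map f := by
  by_cases hx : x ∈ s
  · simp [PySem.Set.add, hx, List.mem_map_of_mem]
  · have hfx : f x ∉ s.map f := by
      intro hm
      obtain ⟨b, hb, he⟩ := List.mem_map.mp hm
      exact hx (hf he ▸ hb)
    simp [PySem.Set.add, hx, hfx]

lemma foldl_add_map {f : (Int × Int) → (Int × Int)} (hf : Function.Injective f) :
    ∀ (l s : List (Int × Int)),
      (l.map f).foldl PySem.Set.add (s.map f) = (l.foldl PySem.Set.add s).map f := by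
  intro l
  induction l with
  | nil => intro s; rfl
  | cons x xs ih =>
    intro s
    simp only [List.map_cons, List.foldl_cons]
    rw [add_map hf, ih]

lemma ofList_map_inj {f : (Int × Int) → (Int × Int)} (hf : Function.Injective f)
    (l : List (Int × Int)) :
    PySem.Set.ofList (l.map f) = (PySem.Set.ofList l).map f := by
  simpa [PySem.Set.ofList, PySem.Set.empty] using foldl_add_map hf l []

lemma ofList_map_ofList {f : (Int × Int) → (Int × Int)} (hf : Function.Injective f)
    (m : List (Int × Int)) :
    PySem.Set.ofList ((PySem.Set.ofList m).map f) = PySem.Set.ofList (m.map f) := by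
  rw [ofList_map_inj hf, PySem.Set.ofList_ofList, ← ofList_map_inj hf]

lemma step_ofList (f : (Int × Int) → Int × Int) (piece : List (Int × Int)) :
    stepA (PySem.Set.ofList (piece.map f)) =
      PySem.Set.ofList (piece.map (fun c => rot60 (f c))) := by
  unfold stepA
  rw [ofList_map_ofList rot60_inj, List.map_map]
  rfl

lemma lexLt_iff (a b : Int × Int) :
    pvLexLt a b = true ↔ (a.1 < b.1 ∨ (a.1 = b.1 ∧ a.2 < b.2)) := by
  simp [pvLexLt]

lemma foldl_pick_spec : ∀ (xs : List (Int × Int)) (a : Int × Int),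
    (xs.foldl (fun m c => if pvLexLt c m then c else m) a = a ∨
      xs.foldl (fun m c => if pvLexLt c m then c else m) a ∈ xs) ∧
    ∀ c ∈ a :: xs, pvLexLt c (xs.foldl (fun m c => if pvLexLt c m then c else m) a) = false := by
  intro xs
  induction xs with
  | nil =>
    intro a
    refine ⟨Or.inl rfl, ?_⟩
    intro c hc
    simp only [List.mem_singleton] at hc
    subst hc
    simp only [List.foldl_nil]
    rw [Bool.eq_false_iff]
    intro h
    rw [lexLt_iff] at h
    omega
  | cons y ys ih =>
    intro a
    simp only [List.foldl_cons]
    obtain ⟨hmem, hmin⟩ := ih (if pvLexLt y a then y else a)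
    constructor
    · rcases hmem with h | h
      · rw [h]
        by_cases hy : pvLexLt y a
        · simp [hy]
        · simp [hy]
      · exact Or.inr (List.mem_cons_of_mem _ h)
    · intro c hc
      set r := ys.foldl (fun m c => if pvLexLt c m then c else m) (if pvLexLt y a then y else a) with hr
      have hpick := hmin _ (List.mem_cons_self)
      simp only [List.mem_cons] at hc
      rcases hc with hca | hcy | hc
      · rw [hca]
        by_cases hy : pvLexLt y a
        · rw [if_pos hy] at hpick
          rw [Bool.eq_false_iff]
          intro har
          rw [lexLt_iff] at har hy
          rw [Bool.eq_false_iff] at hpick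
          apply hpick
          rw [lexLt_iff]
          omega
        · rw [if_neg hy] at hpick; exact hpick
      · rw [hcy]
        by_cases hy : pvLexLt y a
        · rw [if_pos hy] at hpick; exact hpick
        · rw [if_neg hy] at hpick
          rw [Bool.eq_false_iff]
          intro hyr
          rw [lexLt_iff] at hyr
          rw [Bool.eq_false_iff] at hpick
          have hy' : ¬ (y.1 < a.1 ∨ (y.1 = a.1 ∧ y.2 < a.2)) := by
            intro h; exact hy (by rw [lexLt_iff]; exact h)
          apply hpick
          rw [lexLt_iff]
          omega
      · exact hmin _ (List.mem_cons_of_mem _ hc)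

lemma pvTupleMin_spec (x : Int × Int) (xs : List (Int × Int)) :
    pvTupleMin (x :: xs) ∈ x :: xs ∧
      ∀ c ∈ x :: xs, pvLexLt c (pvTupleMin (x :: xs)) = false := by
  obtain ⟨hm, hmin⟩ := foldl_pick_spec xs x
  refine ⟨?_, fun c hc => hmin c hc⟩
  show xs.foldl (fun m c => if pvLexLt c m then c else m) x ∈ x :: xs
  rcases hm with h | h
  · rw [h]; exact List.mem_cons_self
  · exact List.mem_cons_of_mem _ h

lemma min?_isSome {α κ : Type} [LT κ] [DecidableLT κ] (xs : List α) (key : α → κ)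
    (h : xs ≠ []) : ∃ m, PySem.List.min? xs key = some m := by
  have aux : ∀ (ys : List α) (a : α), ∃ m, List.foldl
      (fun acc x => match acc with
        | none => some x
        | some m => if key x < key m then some x else some m) (some a) ys = some m := by
    intro ys
    induction ys with
    | nil => intro a; exact ⟨a, rfl⟩
    | cons y ys ih =>
      intro a
      simp only [List.foldl_cons]
      by_cases hlt : key y < key a
      · simpa [hlt] using ih y
      · simpa [hlt] using ih a
  match xs with
  | [] => exact absurd rfl h
  | x :: xs => simpa [PySem.List.min?] using aux xs x

lemma norm_eq (l : List (Int × Int)) : normA l = normB l := by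
  cases l with
  | nil => rfl
  | cons x xs =>
    obtain ⟨mq, hmq⟩ := min?_isSome ((x :: xs).map Prod.fst) (fun v => v) (by simp)
    have hmq_min : ∀ y ∈ (x :: xs).map Prod.fst, mq ≤ y :=
      fun y hy => PySem.List.min?_isMin hmq y hy
    obtain ⟨c1, hc1l, hc1q⟩ := List.mem_map.mp (PySem.List.min?_mem hmq)
    have hfilter_ne : (x :: xs).filter (fun c => c.1 == mq) ≠ [] := by
      have hc1f : c1 ∈ (x :: xs).filter (fun c => c.1 == mq) :=
        List.mem_filter.mpr ⟨hc1l, by simp [hc1q]⟩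
      intro h
      rw [h] at hc1f
      simp at hc1f
    obtain ⟨mr, hmr⟩ := min?_isSome (((x :: xs).filter (fun c => c.1 == mq)).map Prod.snd)
      (fun v => v) (by simpa using hfilter_ne)
    have hmr_min : ∀ y ∈ ((x :: xs).filter (fun c => c.1 == mq)).map Prod.snd, mr ≤ y :=
      fun y hy => PySem.List.min?_isMin hmr y hy
    obtain ⟨c0, hc0f, hc0r⟩ := List.mem_map.mp (PySem.List.min?_mem hmr)
    obtain ⟨hc0l, hc0q⟩ := List.mem_filter.mp hc0f
    have hc0q' : c0.1 = mq := by simpa using hc0q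
    obtain ⟨hm_mem, hm_min⟩ := pvTupleMin_spec x xs
    have h1 : mq ≤ (pvTupleMin (x :: xs)).1 :=
      hmq_min _ (List.mem_map_of_mem hm_mem)
    have h2 := hm_min c0 hc0l
    rw [Bool.eq_false_iff] at h2
    rw [Ne, lexLt_iff] at h2
    have hm1 : (pvTupleMin (x :: xs)).1 = mq := by omega
    have hmf : pvTupleMin (x :: xs) ∈ (x :: xs).filter (fun c => c.1 == mq) :=
      List.mem_filter.mpr ⟨hm_mem, by simp [hm1]⟩
    have h3 : mr ≤ (pvTupleMin (x :: xs)).2 :=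
      hmr_min _ (List.mem_map_of_mem hmf)
    have hm2 : (pvTupleMin (x :: xs)).2 = mr := by omega
    simp only [normA, normB, hmq, Option.getD_some, hmr, hm1, hm2]

-- ===== VERDICT (by name: the statement is the Claim_ definition above) =====
theorem rotations_of_py_spec : Claim_equal_rotations_of_py := by
  intro piece _ _
  show rotations_of_py piece = rotations_of_py_alt piece
  have e1 : stepA piece = PySem.Set.ofList (piece.map (fun c => (-c.2, c.1 + c.2))) := rfl
  have e2 : stepA (stepA piece) = PySem.Set.ofList (piece.map (fun c : Int × Int => (-c.1 - c.2, c.1))) := by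
    rw [e1, step_ofList]
    congr 1
    apply List.map_congr_left
    intro c _
    simp only [rot60, Prod.mk.injEq]
    omega
  have e3 : stepA (stepA (stepA piece)) = PySem.Set.ofList (piece.map (fun c : Int × Int => (-c.1, -c.2))) := by
    rw [e2, step_ofList]
    congr 1
    apply List.map_congr_left
    intro c _
    simp only [rot60, Prod.mk.injEq, true_and]
    omega
  have e4 : stepA (stepA (stepA (stepA piece))) = PySem.Set.ofList (piece.map (fun c : Int × Int => (c.2, -c.1 - c.2))) := by
    rw [e3, step_ofList]
    congr 1
    apply List.map_congr_left
    intro c _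
    simp only [rot60, Prod.mk.injEq]
    omega
  have e5 : stepA (stepA (stepA (stepA (stepA piece)))) = PySem.Set.ofList (piece.map (fun c : Int × Int => (c.1 + c.2, -c.1))) := by
    rw [e4, step_ofList]
    congr 1
    apply List.map_congr_left
    intro c _
    simp only [rot60, Prod.mk.injEq]
    omega
  have e6 : stepA (stepA (stepA (stepA (stepA (stepA piece))))) = PySem.Set.ofList (piece.map (fun c : Int × Int => (c.1, c.2))) := by
    rw [e5, step_ofList]
    congr 1
    apply List.map_congr_left
    intro c _
    simp only [rot60, Prod.mk.injEq]
    omega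
  rw [A_unfold, B_unfold, e6, e5, e4, e3, e2, e1]
  simp only [pvRotTable, List.map]
  rw [norm_eq, norm_eq, norm_eq, norm_eq, norm_eq, norm_eq]
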